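-- pv_equiv track=rewrite | github.com/busyLambda/tasks-early-2025 | signals/main.py | decode_signals
-- ===== SOURCE A (Python) =====
-- from typing import List, Tuple, Dict, Set
-- from collections import deque
--
-- def decode_signals(days_input: List[Tuple[List[str], List[str]]]) -> Dict[str, str]:
--     days = []
--     codes_to_days: Dict[str, List[int]] = {}
--     for i, (codes, events) in enumerate(days_input):
--         required_events = set(events)
--         days.append({
--             'codes': codes,
--             'required_events': required_events
--         })
--         for code in codes:
--             if code not in codes_to_days:
--                 codes_to_days[code] = []
--             codes_to_days[code].append(i)
--
--     code_possible: Dict[str, Set[str]] = {}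
--     for code in codes_to_days:
--         possible = None
--         for day_idx in codes_to_days[code]:
--             day_req = days[day_idx]['required_events']
--             if possible is None:
--                 possible = day_req.copy()
--             else:
--                 possible.intersection_update(day_req)
--         code_possible[code] = possible.copy() if possible is not None else set()
--
--     queue = deque()
--     assigned: Dict[str, str] = {}
--     for code, possible in code_possible.items():
--         if len(possible) == 1:
--             queue.append(code)
--
--     while queue:
--         current_code = queue.popleft()
--         if current_code in assigned:
--             continue
--         current_possible = code_possible[current_code]
--         if len(current_possible) != 1:
--             continue
--         event = current_possible.pop()
--         assigned[current_code] = event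
--         current_possible.add(event)
--
--         for day_idx in codes_to_days.get(current_code, []):
--             day = days[day_idx]
--             if event in day['required_events']:
--                 day['required_events'].remove(event)
--                 for other_code in day['codes']:
--                     if other_code == current_code or other_code in assigned:
--                         continue
--                     new_possible = None
--                     for other_day_idx in codes_to_days[other_code]:
--                         other_day_req = days[other_day_idx]['required_events']
--                         if new_possible is None:
--                             new_possible = other_day_req.copy()
--                         else:
--                             new_possible.intersection_update(other_day_req)
--                         if not new_possible:
--                             break
--                     if new_possible is None:
--                         new_possible = set()
--                     if new_possible != code_possible[other_code]:
--                         code_possible[other_code] = new_possible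
--                         if len(new_possible) == 1:
--                             queue.append(other_code)
--
--     return assigned
-- ===== SOURCE B (Python) =====
-- from typing import List, Tuple, Dict
-- from collections import deque
--
-- def decode_signals(days_input: List[Tuple[List[str], List[str]]]) -> Dict[str, str]:
--     # Incremental propagation: possible[code] is kept equal to the intersection of
--     # the required-event sets of the code's days; when an event is removed from a
--     # day we simply discard it from the affected codes instead of recomputing
--     # full intersections.
--     day_codes: List[List[str]] = []
--     day_events: List[set] = []
--     code_days: Dict[str, List[int]] = {}
--     for i, (codes, events) in enumerate(days_input):
--         day_codes.append(codes)
--         day_events.append(set(events))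
--         for c in codes:
--             code_days.setdefault(c, []).append(i)
--
--     possible: Dict[str, set] = {}
--     for c, ds in code_days.items():
--         s = set(day_events[ds[0]])
--         for d in ds[1:]:
--             s &= day_events[d]
--         possible[c] = s
--
--     queue = deque(c for c, s in possible.items() if len(s) == 1)
--     assigned: Dict[str, str] = {}
--     while queue:
--         c = queue.popleft()
--         if c in assigned or len(possible[c]) != 1:
--             continue
--         (e,) = possible[c]
--         assigned[c] = e
--         for d in code_days[c]:
--             if e in day_events[d]:
--                 day_events[d].remove(e)
--                 for oc in day_codes[d]:
--                     if oc == c or oc in assigned: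
--                         continue
--                     s = possible[oc]
--                     if e in s:
--                         s.discard(e)
--                         if len(s) == 1:
--                             queue.append(oc)
--     return assigned
-- ===== Notes on version B (the rewrite author's own statement) =====
-- stated objective: faster
-- what changed: B keeps each code's candidate set in sync incrementally: when an assigned event is removed from a day it is simply discarded from the candidate sets of that day's other codes, instead of A's full recomputation of every such code's intersection over all of its days.
import Mathlib
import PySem

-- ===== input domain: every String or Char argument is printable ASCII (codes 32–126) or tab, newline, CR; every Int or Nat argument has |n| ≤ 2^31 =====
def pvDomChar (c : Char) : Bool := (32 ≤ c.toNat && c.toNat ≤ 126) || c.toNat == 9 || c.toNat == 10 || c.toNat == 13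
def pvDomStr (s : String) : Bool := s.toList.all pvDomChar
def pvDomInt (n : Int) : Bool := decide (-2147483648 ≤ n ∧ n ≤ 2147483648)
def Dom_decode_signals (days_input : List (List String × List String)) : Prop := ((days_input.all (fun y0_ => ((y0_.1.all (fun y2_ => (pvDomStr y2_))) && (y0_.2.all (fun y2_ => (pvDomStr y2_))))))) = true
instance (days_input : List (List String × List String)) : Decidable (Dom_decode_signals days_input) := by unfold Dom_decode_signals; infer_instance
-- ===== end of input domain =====

-- B replaces A's repeated full-intersection recomputation during propagation by an
-- incremental discard of the removed event from the affected codes' candidate sets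
-- (same return value; objective: a faster propagation step).
-- ===== PORT A =====
-- A's recompute loop: intersection of the required-event sets of the given days,
-- with A's early 'if not new_possible: break'
def dsA_intersect (days : List (List String × List String)) (idxs : List Int)
    (acc : Option (List String)) : Option (List String) :=
  match idxs with
  | [] => acc
  | d :: rest =>
    let req := (PySem.List.pyGetD days d ([], [])).2
    let acc' := match acc with
      | none => req                      -- new_possible = other_day_req.copy()
      | some p => PySem.Set.inter p req  -- new_possible.intersection_update(other_day_req)
    if acc' = [] then some acc'          -- if not new_possible: break
    else dsA_intersect days rest (some acc')

-- A's 'while queue' loop; fuel only makes the recursion structural (each call pops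
-- one queue element; the callers pass enough fuel for every pop that can happen)
def dsA_loop (ctd : PySem.Dict String (List Int)) (fuel : Nat)
    (days : List (List String × List String))
    (cp : PySem.Dict String (List String))
    (assigned : PySem.Dict String String) (queue : List String) :
    List (String × String) :=
  match fuel, queue with
  | 0, _ => assigned.items
  | _ + 1, [] => assigned.items
  | fuel + 1, current :: queue =>
    if assigned.contains current then dsA_loop ctd fuel days cp assigned queue
    else
      let curp := cp.getD current []
      if PySem.Set.len curp != 1 then dsA_loop ctd fuel days cp assigned queue
      else
        -- event = current_possible.pop(); current_possible.add(event):
        -- on a one-element set this reads its element and leaves the set unchanged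
        let event := curp.headD ""
        let assigned := assigned.insert current event
        let st := (ctd.getD current []).foldl
          (fun (st : List (List String × List String) ×
                 PySem.Dict String (List String) × List String) day_idx =>
            let day := PySem.List.pyGetD st.1 day_idx ([], [])
            if PySem.Set.contains day.2 event then
              let days' := PySem.List.pySetD st.1 day_idx
                (day.1, PySem.Set.discard day.2 event)  -- required_events.remove(event), guarded by the 'in' test
              let inner := day.1.foldl
                (fun (st2 : PySem.Dict String (List String) × List String) other =>
                  if other == current || assigned.contains other then st2
                  else
                    let newp := (dsA_intersect days' (ctd.getD other []) none).getD []
                    if PySem.Set.equal newp (st2.1.getD other []) then st2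
                    else (st2.1.insert other newp,
                          if PySem.Set.len newp == 1 then st2.2 ++ [other] else st2.2))
                (st.2.1, st.2.2)
              (days', inner.1, inner.2)
            else st)
          (days, cp, queue)
        dsA_loop ctd fuel st.1 st.2.1 assigned st.2.2

def decode_signals (days_input : List (List String × List String)) : List (String × String) :=
  -- days as (codes, required_events) pairs; codes_to_days with the if-not-in/append idiom
  let built := (PySem.List.enumerate days_input).foldl
    (fun (st : List (List String × List String) × PySem.Dict String (List Int)) ie =>
      (st.1 ++ [(ie.2.1, PySem.Set.ofList ie.2.2)],
       ie.2.1.foldl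
         (fun m code =>
           let m := if m.contains code then m else m.insert code ([] : List Int)
           m.insert code (m.getD code [] ++ [ie.1]))
         st.2))
    ([], PySem.Dict.empty)
  let days := built.1
  let ctd := built.2
  let cp := ctd.keys.foldl
    (fun cp code =>
      let poss := (ctd.getD code []).foldl
        (fun (poss : Option (List String)) day_idx =>
          let req := (PySem.List.pyGetD days day_idx ([], [])).2
          match poss with
          | none => some req
          | some p => some (PySem.Set.inter p req))
        none
      cp.insert code (poss.getD []))  -- possible.copy() if possible is not None else set()
    (PySem.Dict.empty : PySem.Dict String (List String))
  let queue := cp.items.foldl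
    (fun q it => if PySem.Set.len it.2 == 1 then q ++ [it.1] else q) ([] : List String)
  -- fuel for the while loop: with n = total number of code occurrences there are at
  -- most n initial queue entries, ≤ n assignments and ≤ n pushes per assignment,
  -- so n*n + n + 1 pops always suffice
  let n := (days_input.map (fun p => p.1.length)).sum
  dsA_loop ctd (n * n + n + 1) days cp PySem.Dict.empty queue

-- ===== PORT B =====
-- B's while loop: on assignment of e to c, e is removed from c's days and simply
-- discarded from the candidate sets of the codes sharing those days
def dsB_loop (code_days : PySem.Dict String (List Int)) (fuel : Nat)
    (day_codes : List (List String)) (day_events : List (List String))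
    (possible : PySem.Dict String (List String))
    (assigned : PySem.Dict String String) (queue : List String) :
    List (String × String) :=
  match fuel, queue with
  | 0, _ => assigned.items
  | _ + 1, [] => assigned.items
  | fuel + 1, c :: queue =>
    if assigned.contains c || PySem.Set.len (possible.getD c []) != 1 then
      dsB_loop code_days fuel day_codes day_events possible assigned queue
    else
      let e := (possible.getD c []).headD ""  -- (e,) = possible[c]
      let assigned := assigned.insert c e
      let st := (code_days.getD c []).foldl
        (fun (st : List (List String) × PySem.Dict String (List String) × List String) d =>
          if PySem.Set.contains (PySem.List.pyGetD st.1 d []) e then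
            let de := PySem.List.pySetD st.1 d
              (PySem.Set.discard (PySem.List.pyGetD st.1 d []) e)  -- day_events[d].remove(e), guarded
            let st2 := (PySem.List.pyGetD day_codes d []).foldl
              (fun (st2 : PySem.Dict String (List String) × List String) oc =>
                if oc == c || assigned.contains oc then st2
                else
                  let s := st2.1.getD oc []
                  if PySem.Set.contains s e then
                    let s' := PySem.Set.discard s e
                    (st2.1.insert oc s',
                     if PySem.Set.len s' == 1 then st2.2 ++ [oc] else st2.2)
                  else st2)
              (st.2.1, st.2.2)
            (de, st2.1, st2.2)
          else st)
        (day_events, possible, queue)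
      dsB_loop code_days fuel day_codes st.1 st.2.1 assigned st.2.2

def decode_signals_alt (days_input : List (List String × List String)) : List (String × String) :=
  -- parallel day_codes / day_events lists; code_days with the setdefault idiom
  let built := (PySem.List.enumerate days_input).foldl
    (fun (st : List (List String) × List (List String) × PySem.Dict String (List Int)) ie =>
      (st.1 ++ [ie.2.1], st.2.1 ++ [PySem.Set.ofList ie.2.2],
       ie.2.1.foldl
         (fun m c =>
           let m := m.setdefault c ([] : List Int)
           m.insert c (m.getD c [] ++ [ie.1]))
         st.2.2))
    ([], [], PySem.Dict.empty)
  let day_codes := built.1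
  let day_events := built.2.1
  let code_days := built.2.2
  let possible := code_days.items.foldl
    (fun p it =>
      p.insert it.1
        (match it.2 with
         | [] => []  -- unreachable: every code recorded in code_days has at least one day
         | d0 :: rest =>
           rest.foldl (fun s d => PySem.Set.inter s (PySem.List.pyGetD day_events d []))
             (PySem.List.pyGetD day_events d0 [])))
    (PySem.Dict.empty : PySem.Dict String (List String))
  let queue := (possible.items.filter (fun it => PySem.Set.len it.2 == 1)).map (fun it => it.1)
  -- same pop bound as A's loop (the two loops pop in lockstep)
  let n := (days_input.map (fun p => p.1.length)).sum
  dsB_loop code_days (n * n + n + 1) day_codes day_events possible PySem.Dict.empty queue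

-- ===== PRECONDITION & SPEC =====
def Spec_decode_signals (days_input : List (List String × List String)) (out : List (String × String)) : Prop := out = decode_signals_alt days_input
instance (days_input : List (List String × List String)) (out : List (String × String)) : Decidable (Spec_decode_signals days_input out) := by unfold Spec_decode_signals; infer_instance
-- ===== CLAIM (what is proved, stated in full; the proofs are below) =====
def Claim_equal_decode_signals : Prop := ∀ (days_input : List (List String × List String)), Dom_decode_signals days_input → Spec_decode_signals days_input (decode_signals days_input)

-- ===== LEMMAS AND PROOFS =====

-- canonical intersection of the required-event sets at the given day indices
def interAll (reqs : List (List String)) (idxs : List Int) : List String :=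
  match idxs with
  | [] => []
  | d :: rest =>
    rest.foldl (fun s dd => PySem.Set.inter s (PySem.List.pyGetD reqs dd []))
      (PySem.List.pyGetD reqs d [])

theorem pv_foldl_inter (g : Int → List String) (idxs : List Int) (s0 : List String) :
    idxs.foldl (fun s dd => PySem.Set.inter s (g dd)) s0
      = s0.filter (fun x => idxs.all (fun dd => (g dd).contains x)) := by
  induction idxs generalizing s0 with
  | nil => simp
  | cons d rest ih =>
    rw [List.foldl_cons, ih]
    simp only [PySem.Set.inter, List.filter_filter]
    exact List.filter_congr (fun x _ => by
      simp only [List.all_cons, PySem.Set.contains_eq_listContains]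
      cases h1 : (g d).contains x <;> cases h2 : rest.all fun dd => (g dd).contains x <;> simp [h1, h2])

theorem pv_foldl_inter_nil (g : Int → List String) (idxs : List Int) :
    idxs.foldl (fun s dd => PySem.Set.inter s (g dd)) [] = [] := by
  rw [pv_foldl_inter]; rfl

theorem pv_pyGetD_snd (days : List (List String × List String)) (d : Int) :
    (PySem.List.pyGetD days d ([], [])).2 = PySem.List.pyGetD (days.map (·.2)) d [] :=
  (PySem.List.pyGetD_map (fun p => p.2) days d ([], [])).symm

theorem dsA_intersect_some (days : List (List String × List String)) (idxs : List Int)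
    (p : List String) :
    dsA_intersect days idxs (some p)
      = some (idxs.foldl (fun s dd => PySem.Set.inter s (PySem.List.pyGetD (days.map (·.2)) dd [])) p) := by
  induction idxs generalizing p with
  | nil => rfl
  | cons d rest ih =>
    simp only [dsA_intersect, pv_pyGetD_snd, List.foldl_cons]
    split
    · next h =>
      rw [h, pv_foldl_inter_nil]
    · next h => exact ih _

theorem dsA_intersect_none (days : List (List String × List String)) (idxs : List Int) :
    (dsA_intersect days idxs none).getD [] = interAll (days.map (·.2)) idxs := by
  cases idxs with
  | nil => rfl
  | cons d rest =>
    simp only [dsA_intersect, pv_pyGetD_snd, interAll]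
    split
    · next h => rw [h, pv_foldl_inter_nil]; rfl
    · next h => rw [dsA_intersect_some]; rfl

theorem pv_all_discard_aux (reqs reqs' : List (List String)) (k : Nat) (e : String)
    (hG : ∀ m : Nat, PySem.List.pyGetD reqs' (m : Int) []
        = if m = k then PySem.Set.discard (PySem.List.pyGetD reqs (m : Int) []) e
          else PySem.List.pyGetD reqs (m : Int) [])
    (rest : List Int) (hidx : ∀ i ∈ rest, ∃ m : Nat, i = (m : Int)) (x : String) :
    rest.all (fun dd => (PySem.List.pyGetD reqs' dd []).contains x)
      = (rest.all (fun dd => (PySem.List.pyGetD reqs dd []).contains x)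
          && (!(decide ((k : Int) ∈ rest)) || !(x == e))) := by
  induction rest with
  | nil => simp
  | cons d rest ih =>
    obtain ⟨m, rfl⟩ := hidx d (List.mem_cons_self ..)
    have ihr := ih (fun i hi => hidx i (List.mem_cons_of_mem _ hi))
    simp only [List.all_cons, ihr, hG m]
    rw [Bool.eq_iff_iff]
    by_cases hmk : m = k
    · subst hmk
      simp only [if_pos rfl, PySem.Set.discard, Bool.and_eq_true, Bool.or_eq_true,
        Bool.not_eq_true', List.contains_iff_mem, List.mem_filter, beq_eq_false_iff_ne,
        decide_eq_false_iff_not, List.mem_cons, beq_iff_eq]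
      by_cases hxe : x = e <;> simp [hxe] <;> tauto
    · simp only [if_neg hmk, Bool.and_eq_true, Bool.or_eq_true, Bool.not_eq_true',
        List.contains_iff_mem, decide_eq_false_iff_not, List.mem_cons, beq_eq_false_iff_ne]
      have hkm : ¬ ((k : Int) = (m : Int)) := fun h => hmk (Int.natCast_inj.mp h).symm
      by_cases hxe : x = e <;> simp [hxe, hkm] <;> tauto

theorem interAll_discard (reqs : List (List String)) (k : Nat) (hk : k < reqs.length)
    (e : String) (idxs : List Int)
    (hidx : ∀ i ∈ idxs, ∃ m : Nat, i = (m : Int) ∧ m < reqs.length) :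
    interAll (PySem.List.pySetD reqs (k : Int)
        (PySem.Set.discard (PySem.List.pyGetD reqs (k : Int) []) e)) idxs
      = if (k : Int) ∈ idxs then PySem.Set.discard (interAll reqs idxs) e
        else interAll reqs idxs := by
  set reqs' : List (List String) := PySem.List.pySetD reqs (k : Int)
      (PySem.Set.discard (PySem.List.pyGetD reqs (k : Int) []) e) with hreqs'
  have hG : ∀ m : Nat, PySem.List.pyGetD reqs' (m : Int) []
      = if m = k then PySem.Set.discard (PySem.List.pyGetD reqs (m : Int) []) e
        else PySem.List.pyGetD reqs (m : Int) [] := by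
    intro m
    rw [hreqs', PySem.List.pyGetD_pySetD_natCast reqs k m _ [] hk]
    by_cases h : m = k
    · subst h; rfl
    · rw [if_neg h, if_neg h]
  clear_value reqs'
  cases idxs with
  | nil => simp [interAll]
  | cons d rest =>
    obtain ⟨m0, rfl, hm0len⟩ := hidx d (List.mem_cons_self ..)
    have hidx' : ∀ i ∈ rest, ∃ m : Nat, i = (m : Int) :=
      fun i hi => ⟨(hidx i (List.mem_cons_of_mem _ hi)).choose,
        (hidx i (List.mem_cons_of_mem _ hi)).choose_spec.1⟩
    simp only [interAll, pv_foldl_inter, hG m0]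
    have hall : ∀ x : String,
        rest.all (fun dd => (PySem.List.pyGetD reqs' dd []).contains x)
          = (rest.all (fun dd => (PySem.List.pyGetD reqs dd []).contains x)
              && (!(decide ((k : Int) ∈ rest)) || !(x == e))) :=
      pv_all_discard_aux reqs reqs' k e hG rest hidx'
    by_cases hmk : m0 = k
    · subst hmk
      rw [if_pos rfl, if_pos (List.mem_cons_self ..)]
      simp only [PySem.Set.discard, List.filter_filter]
      exact List.filter_congr (fun x _ => by
        rw [hall x]
        cases h1 : (x == e) <;>
          cases h2 : rest.all (fun dd => (PySem.List.pyGetD reqs dd []).contains x) <;>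
          cases h3 : decide ((m0 : Int) ∈ rest) <;> simp [h1, h2, h3])
    · have hkm : ¬ ((k : Int) = (m0 : Int)) := fun h => hmk (Int.natCast_inj.mp h).symm
      rw [if_neg hmk]
      by_cases hkr : (k : Int) ∈ rest
      · rw [if_pos (List.mem_cons_of_mem _ hkr)]
        simp only [PySem.Set.discard, List.filter_filter]
        exact List.filter_congr (fun x _ => by
          rw [hall x]
          cases h1 : (x == e) <;>
            cases h2 : rest.all (fun dd => (PySem.List.pyGetD reqs dd []).contains x) <;>
            simp [h1, h2, hkr])
      · have hnm : ¬ ((k : Int) ∈ (m0 : Int) :: rest) := by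
          simp [List.mem_cons, hkm, hkr]
        rw [if_neg hnm]
        exact List.filter_congr (fun x _ => by
          rw [hall x]
          cases h2 : rest.all (fun dd => (PySem.List.pyGetD reqs dd []).contains x) <;>
            simp [h2, hkr])

theorem ctd_step_eq :
    (fun (m : PySem.Dict String (List Int)) (code : String) (i : Int) =>
      let m' := if m.contains code then m else m.insert code ([] : List Int)
      m'.insert code (m'.getD code [] ++ [i]))
    = (fun (m : PySem.Dict String (List Int)) (code : String) (i : Int) =>
      let m' := m.setdefault code ([] : List Int)
      m'.insert code (m'.getD code [] ++ [i])) := by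
  funext m code i
  by_cases h : m.contains code
  · simp only [PySem.Dict.setdefault_of_contains m ([] : List Int) h, if_pos h]
  · simp only [PySem.Dict.setdefault_of_not_contains m ([] : List Int)
      (by simpa using h), if_neg h]

theorem ctd_inner_getD (codes : List String) (i : Int)
    (m : PySem.Dict String (List Int)) (c : String) :
    (codes.foldl (fun m cd =>
        let m' := m.setdefault cd ([] : List Int)
        m'.insert cd (m'.getD cd [] ++ [i])) m).getD c []
      = m.getD c [] ++ List.replicate (codes.count c) i := by
  induction codes generalizing m with
  | nil => simp
  | cons cd rest ih =>
    rw [List.foldl_cons, ih]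
    by_cases h : cd = c
    · subst h
      rw [PySem.Dict.getD_insert_self, PySem.Dict.getD_setdefault_self]
      rw [List.count_cons]
      simp [List.replicate_succ]
    · rw [PySem.Dict.getD_insert_of_ne _ _ _ (Ne.symm h)]
      have : (m.setdefault cd ([] : List Int)).getD c [] = m.getD c [] := by
        simp only [PySem.Dict.getD, PySem.Dict.get?_setdefault_of_ne m _ (Ne.symm h)]
      rw [this, List.count_cons]
      simp [h]

theorem ctd_inner_nodup (codes : List String) (i : Int)
    (m : PySem.Dict String (List Int)) (h : m.keys.Nodup) :
    (codes.foldl (fun m cd =>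
        let m' := m.setdefault cd ([] : List Int)
        m'.insert cd (m'.getD cd [] ++ [i])) m).keys.Nodup := by
  induction codes generalizing m with
  | nil => exact h
  | cons cd rest ih =>
    rw [List.foldl_cons]
    refine ih _ (PySem.Dict.nodup_keys_insert _ _ _ ?_)
    rw [PySem.Dict.keys_setdefault]
    split
    · exact h
    · next hc =>
      refine List.Nodup.append h (List.nodup_singleton cd) ?_
      intro a ha hb
      rw [List.mem_singleton] at hb
      subst hb
      have hnk : a ∉ m.keys := by
        rw [← PySem.Dict.contains_iff_mem_keys]; simpa using hc
      exact hnk ha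

theorem ctd_build_getD (l : List (Int × (List String × List String)))
    (m : PySem.Dict String (List Int)) (c : String) :
    (l.foldl (fun m ie => ie.2.1.foldl (fun m cd =>
        let m' := m.setdefault cd ([] : List Int)
        m'.insert cd (m'.getD cd [] ++ [ie.1])) m) m).getD c []
      = m.getD c [] ++ l.flatMap (fun ie => List.replicate (ie.2.1.count c) ie.1) := by
  induction l generalizing m with
  | nil => simp
  | cons ie rest ih =>
    rw [List.foldl_cons, ih, ctd_inner_getD]
    simp [List.append_assoc]

theorem ctd_build_nodup (l : List (Int × (List String × List String)))
    (m : PySem.Dict String (List Int)) (h : m.keys.Nodup) :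
    (l.foldl (fun m ie => ie.2.1.foldl (fun m cd =>
        let m' := m.setdefault cd ([] : List Int)
        m'.insert cd (m'.getD cd [] ++ [ie.1])) m) m).keys.Nodup := by
  induction l generalizing m with
  | nil => exact h
  | cons ie rest ih => exact ih _ (ctd_inner_nodup _ _ _ h)

theorem pv_equal_self (s : List String) : PySem.Set.equal s s = true :=
  (PySem.Set.equal_iff s s).mpr (fun _ => Iff.rfl)

theorem pv_equal_discard_false (s : List String) (e : String) (he : e ∈ s) :
    PySem.Set.equal (PySem.Set.discard s e) s = false := by
  by_contra h
  have ht : PySem.Set.equal (PySem.Set.discard s e) s = true := by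
    cases hx : PySem.Set.equal (PySem.Set.discard s e) s
    · exact absurd hx h
    · rfl
  have := ((PySem.Set.equal_iff _ _).mp ht e).mpr he
  exact ((PySem.Set.mem_discard s e e).mp this).2 rfl

theorem pv_discard_of_not_mem (s : List String) (e : String) (he : e ∉ s) :
    PySem.Set.discard s e = s := by
  apply List.filter_eq_self.mpr
  intro y hy
  have : y ≠ e := fun h => he (h ▸ hy)
  simp [this]

theorem pv_contains_eq (s : List String) (e : String) :
    PySem.Set.contains s e = decide (e ∈ s) := by
  by_cases h : e ∈ s
  · rw [decide_eq_true h, (PySem.Set.contains_iff s e).mpr h]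
  · rw [decide_eq_false h]
    cases hc : PySem.Set.contains s e
    · rfl
    · exact absurd ((PySem.Set.contains_iff s e).mp hc) h

-- proof-side names for the two inner-loop step functions
def stepAinner (ctd : PySem.Dict String (List Int)) (assigned : PySem.Dict String String)
    (current event : String) (days' : List (List String × List String))
    (st2 : PySem.Dict String (List String) × List String) (other : String) :
    PySem.Dict String (List String) × List String :=
  if other == current || assigned.contains other then st2
  else
    let newp := (dsA_intersect days' (ctd.getD other []) none).getD []
    if PySem.Set.equal newp (st2.1.getD other []) then st2
    else (st2.1.insert other newp,
          if PySem.Set.len newp == 1 then st2.2 ++ [other] else st2.2)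

def stepBinner (assigned : PySem.Dict String String) (current event : String)
    (st2 : PySem.Dict String (List String) × List String) (oc : String) :
    PySem.Dict String (List String) × List String :=
  if oc == current || assigned.contains oc then st2
  else
    let s := st2.1.getD oc []
    if PySem.Set.contains s event then
      let s' := PySem.Set.discard s event
      (st2.1.insert oc s',
       if PySem.Set.len s' == 1 then st2.2 ++ [oc] else st2.2)
    else st2

theorem stepA_skip (ctd assigned current event days') (st2) (oc : String)
    (h : (oc == current || assigned.contains oc) = true) :
    stepAinner ctd assigned current event days' st2 oc = st2 := by
  simp only [stepAinner, if_pos h]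

theorem stepB_skip (assigned current event) (st2) (oc : String)
    (h : (oc == current || assigned.contains oc) = true) :
    stepBinner assigned current event st2 oc = st2 := by
  simp only [stepBinner, if_pos h]

theorem stepA_go (ctd assigned current event days') (st2 : PySem.Dict String (List String) × List String) (oc : String)
    (h : (oc == current || assigned.contains oc) = false) :
    stepAinner ctd assigned current event days' st2 oc
      = (if PySem.Set.equal ((dsA_intersect days' (ctd.getD oc []) none).getD [])
            (st2.1.getD oc []) then st2
         else (st2.1.insert oc ((dsA_intersect days' (ctd.getD oc []) none).getD []),
               if PySem.Set.len ((dsA_intersect days' (ctd.getD oc []) none).getD []) == 1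
               then st2.2 ++ [oc] else st2.2)) := by
  simp only [stepAinner, h, Bool.false_eq_true, if_false]

theorem stepB_go (assigned current event) (st2 : PySem.Dict String (List String) × List String) (oc : String)
    (h : (oc == current || assigned.contains oc) = false) :
    stepBinner assigned current event st2 oc
      = (if PySem.Set.contains (st2.1.getD oc []) event then
           (st2.1.insert oc (PySem.Set.discard (st2.1.getD oc []) event),
            if PySem.Set.len (PySem.Set.discard (st2.1.getD oc []) event) == 1
            then st2.2 ++ [oc] else st2.2)
         else st2) := by
  simp only [stepBinner, h, Bool.false_eq_true, if_false]

theorem inner_eq (ctd : PySem.Dict String (List Int)) (assigned : PySem.Dict String String)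
    (current event : String) (days' : List (List String × List String))
    (reqs : List (List String)) (k : Nat)
    (hFACT : ∀ c, (k : Int) ∈ ctd.getD c [] →
        interAll (days'.map (·.2)) (ctd.getD c [])
          = PySem.Set.discard (interAll reqs (ctd.getD c [])) event)
    (hcur : assigned.contains current = true)
    (codes : List String) (hcodes : ∀ oc ∈ codes, (k : Int) ∈ ctd.getD oc []) :
    ∀ (cp : PySem.Dict String (List String)) (queue : List String),
    (∀ c, assigned.contains c = false →
        cp.getD c [] = interAll reqs (ctd.getD c [])
        ∨ cp.getD c [] = interAll (days'.map (·.2)) (ctd.getD c [])) →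
    (codes.foldl (stepAinner ctd assigned current event days') (cp, queue)
      = codes.foldl (stepBinner assigned current event) (cp, queue))
    ∧ (∀ c, assigned.contains c = false →
        (codes.foldl (stepAinner ctd assigned current event days') (cp, queue)).1.getD c []
            = interAll reqs (ctd.getD c [])
        ∨ (codes.foldl (stepAinner ctd assigned current event days') (cp, queue)).1.getD c []
            = interAll (days'.map (·.2)) (ctd.getD c []))
    ∧ (∀ c, assigned.contains c = false →
        cp.getD c [] = interAll (days'.map (·.2)) (ctd.getD c []) →
        (codes.foldl (stepAinner ctd assigned current event days') (cp, queue)).1.getD c []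
          = interAll (days'.map (·.2)) (ctd.getD c []))
    ∧ (∀ c ∈ codes, assigned.contains c = false →
        (codes.foldl (stepAinner ctd assigned current event days') (cp, queue)).1.getD c []
          = interAll (days'.map (·.2)) (ctd.getD c [])) := by
  induction codes with
  | nil =>
    intro cp queue hmix
    exact ⟨rfl, hmix, fun c _ h2 => h2, fun c hc => absurd hc (List.not_mem_nil)⟩
  | cons oc rest ih =>
    intro cp queue hmix
    have hkoc : (k : Int) ∈ ctd.getD oc [] := hcodes oc (List.mem_cons_self ..)
    have hcodes' : ∀ o ∈ rest, (k : Int) ∈ ctd.getD o [] :=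
      fun o ho => hcodes o (List.mem_cons_of_mem _ ho)
    have ihr := ih hcodes'
    rw [List.foldl_cons, List.foldl_cons]
    by_cases hskip : (oc == current || assigned.contains oc) = true
    · rw [stepA_skip _ _ _ _ _ _ _ hskip, stepB_skip _ _ _ _ _ hskip]
      obtain ⟨e1, e2, e3, e4⟩ := ihr cp queue hmix
      refine ⟨e1, e2, e3, ?_⟩
      intro c hcmem hc
      rcases List.mem_cons.mp hcmem with rfl | hcr
      · rcases Bool.or_eq_true_iff.mp hskip with h | h
        · rw [beq_iff_eq] at h
          subst h
          exact absurd hcur (by rw [hc]; exact Bool.false_ne_true)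
        · exact absurd h (by rw [hc]; exact Bool.false_ne_true)
      · exact e4 c hcr hc
    · have hskip' : (oc == current || assigned.contains oc) = false := by
        cases h : (oc == current || assigned.contains oc)
        · rfl
        · exact absurd h hskip
      rw [stepA_go _ _ _ _ _ _ _ hskip', stepB_go _ _ _ _ _ hskip']
      have hocn : assigned.contains oc = false := by
        cases h : assigned.contains oc
        · rfl
        · exact absurd (by rw [h, Bool.or_true]) hskip
      have hnewp : (dsA_intersect days' (ctd.getD oc []) none).getD []
          = PySem.Set.discard (interAll reqs (ctd.getD oc [])) event := by
        rw [dsA_intersect_none, hFACT oc hkoc]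
      rcases hmix oc hocn with h1 | h1
      · by_cases he : event ∈ cp.getD oc []
        · -- A updates, B updates, to the same value
          have heq : (dsA_intersect days' (ctd.getD oc []) none).getD []
              = PySem.Set.discard (cp.getD oc []) event := by rw [hnewp, h1]
          rw [heq, pv_equal_discard_false _ _ he, pv_contains_eq, decide_eq_true he]
          simp only [Bool.false_eq_true, if_false, if_true]
          have hstep : ∀ c, assigned.contains c = false →
              ((cp.insert oc (PySem.Set.discard (cp.getD oc []) event)).getD c []
                  = interAll reqs (ctd.getD c [])
                ∨ (cp.insert oc (PySem.Set.discard (cp.getD oc []) event)).getD c []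
                  = interAll (days'.map (·.2)) (ctd.getD c [])) := by
            intro c hc
            by_cases hcoc : c = oc
            · subst hcoc
              rw [PySem.Dict.getD_insert_self]
              right
              rw [hFACT c hkoc, h1]
            · rw [PySem.Dict.getD_insert_of_ne _ _ _ hcoc]
              exact hmix c hc
          obtain ⟨e1, e2, e3, e4⟩ := ihr _ _ hstep
          refine ⟨e1, e2, ?_, ?_⟩
          · intro c hc h2
            by_cases hcoc : c = oc
            · subst hcoc
              exact e3 c hc (by rw [PySem.Dict.getD_insert_self, hFACT c hkoc, h1])
            · exact e3 c hc (by rw [PySem.Dict.getD_insert_of_ne _ _ _ hcoc]; exact h2)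
          · intro c hcmem hc
            rcases List.mem_cons.mp hcmem with hcoc | hcr
            · subst hcoc
              exact e3 c hc (by rw [PySem.Dict.getD_insert_self, hFACT c hkoc, h1])
            · exact e4 c hcr hc
        · -- event not present: both sides skip
          have hsame : PySem.Set.discard (cp.getD oc []) event = cp.getD oc [] :=
            pv_discard_of_not_mem _ _ he
          have heq : (dsA_intersect days' (ctd.getD oc []) none).getD [] = cp.getD oc [] := by
            rw [hnewp, ← h1, hsame]
          rw [heq, pv_equal_self, pv_contains_eq, decide_eq_false he]
          simp only [if_true, Bool.false_eq_true, if_false]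
          have hboth : cp.getD oc [] = interAll (days'.map (·.2)) (ctd.getD oc []) := by
            rw [hFACT oc hkoc, ← h1, hsame]
          obtain ⟨e1, e2, e3, e4⟩ := ihr cp queue hmix
          refine ⟨e1, e2, e3, ?_⟩
          intro c hcmem hc
          rcases List.mem_cons.mp hcmem with hcoc | hcr
          · subst hcoc
            exact e3 c hc hboth
          · exact e4 c hcr hc
      · -- entry already synced to days'
        have hne : event ∉ cp.getD oc [] := by
          rw [h1, hFACT oc hkoc]
          intro hmem
          exact ((PySem.Set.mem_discard _ _ _).mp hmem).2 rfl
        have heq : (dsA_intersect days' (ctd.getD oc []) none).getD [] = cp.getD oc [] := by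
          rw [hnewp, h1, hFACT oc hkoc]
        rw [heq, pv_equal_self, pv_contains_eq, decide_eq_false hne]
        simp only [if_true, Bool.false_eq_true, if_false]
        obtain ⟨e1, e2, e3, e4⟩ := ihr cp queue hmix
        refine ⟨e1, e2, e3, ?_⟩
        intro c hcmem hc
        rcases List.mem_cons.mp hcmem with hcoc | hcr
        · subst hcoc
          exact e3 c hc h1
        · exact e4 c hcr hc

-- proof-side names for the two middle-loop (per-day) step functions
def stepAmid (ctd : PySem.Dict String (List Int)) (assigned : PySem.Dict String String)
    (current event : String)
    (st : List (List String × List String) × PySem.Dict String (List String) × List String)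
    (day_idx : Int) :
    List (List String × List String) × PySem.Dict String (List String) × List String :=
  let day := PySem.List.pyGetD st.1 day_idx ([], [])
  if PySem.Set.contains day.2 event then
    let days' := PySem.List.pySetD st.1 day_idx (day.1, PySem.Set.discard day.2 event)
    let inner := day.1.foldl (stepAinner ctd assigned current event days') (st.2.1, st.2.2)
    (days', inner.1, inner.2)
  else st

def stepBmid (assigned : PySem.Dict String String) (current event : String)
    (day_codes : List (List String))
    (st : List (List String) × PySem.Dict String (List String) × List String)
    (d : Int) :
    List (List String) × PySem.Dict String (List String) × List String :=
  if PySem.Set.contains (PySem.List.pyGetD st.1 d []) event then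
    let de := PySem.List.pySetD st.1 d (PySem.Set.discard (PySem.List.pyGetD st.1 d []) event)
    let st2 := (PySem.List.pyGetD day_codes d []).foldl
      (stepBinner assigned current event) (st.2.1, st.2.2)
    (de, st2.1, st2.2)
  else st

set_option maxHeartbeats 2000000 in
theorem middle_eq (ctd : PySem.Dict String (List Int)) (assigned : PySem.Dict String String)
    (current event : String) (dcs : List (List String))
    (HP : ∀ c i, i ∈ ctd.getD c [] →
        ∃ k : Nat, i = (k : Int) ∧ k < dcs.length ∧ c ∈ dcs.getD k [])
    (HQ : ∀ (k : Nat) c, k < dcs.length → c ∈ dcs.getD k [] → (k : Int) ∈ ctd.getD c [])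
    (hcur : assigned.contains current = true) :
    ∀ (idxs : List Int) (days : List (List String × List String))
      (cp : PySem.Dict String (List String)) (queue : List String),
    (∀ i ∈ idxs, i ∈ ctd.getD current []) →
    days.map (·.1) = dcs →
    (∀ c, assigned.contains c = false →
        cp.getD c [] = interAll (days.map (·.2)) (ctd.getD c [])) →
    (idxs.foldl (stepBmid assigned current event dcs) (days.map (·.2), cp, queue)
      = ((idxs.foldl (stepAmid ctd assigned current event) (days, cp, queue)).1.map (·.2),
         (idxs.foldl (stepAmid ctd assigned current event) (days, cp, queue)).2.1,
         (idxs.foldl (stepAmid ctd assigned current event) (days, cp, queue)).2.2))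
    ∧ (idxs.foldl (stepAmid ctd assigned current event) (days, cp, queue)).1.map (·.1) = dcs
    ∧ (∀ c, assigned.contains c = false →
        (idxs.foldl (stepAmid ctd assigned current event) (days, cp, queue)).2.1.getD c []
          = interAll ((idxs.foldl (stepAmid ctd assigned current event) (days, cp, queue)).1.map (·.2))
              (ctd.getD c [])) := by
  intro idxs
  induction idxs with
  | nil =>
    intro days cp queue _ hmap hinv
    exact ⟨rfl, hmap, hinv⟩
  | cons d rest ih =>
    intro days cp queue hidxs hmap hinv
    obtain ⟨k, rfl, hklen, hcurmem⟩ := HP current d (hidxs d (List.mem_cons_self ..))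
    have hidxs' : ∀ i ∈ rest, i ∈ ctd.getD current [] :=
      fun i hi => hidxs i (List.mem_cons_of_mem _ hi)
    have hdayslen : days.length = dcs.length := by
      rw [← hmap, List.length_map]
    have hsnd : (PySem.List.pyGetD days (k : Int) ([], [])).2
        = PySem.List.pyGetD (days.map (·.2)) (k : Int) [] := pv_pyGetD_snd days (k : Int)
    have hfst : (PySem.List.pyGetD days (k : Int) ([], [])).1
        = dcs.getD k [] := by
      have h1 : PySem.List.pyGetD (days.map (·.1)) (k : Int) []
          = (PySem.List.pyGetD days (k : Int) ([], [])).1 :=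
        PySem.List.pyGetD_map (fun p => p.1) days (k : Int) ([], [])
      rw [← h1, hmap, PySem.List.pyGetD_natCast]
    rw [List.foldl_cons, List.foldl_cons]
    by_cases hcond : PySem.Set.contains (PySem.List.pyGetD days (k : Int) ([], [])).2 event = true
    · -- event present in this day: both sides remove it and update
      have hstepA : stepAmid ctd assigned current event (days, cp, queue) (k : Int)
          = (PySem.List.pySetD days (k : Int)
               ((PySem.List.pyGetD days (k : Int) ([], [])).1,
                PySem.Set.discard (PySem.List.pyGetD days (k : Int) ([], [])).2 event),
             ((PySem.List.pyGetD days (k : Int) ([], [])).1.foldl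
               (stepAinner ctd assigned current event
                 (PySem.List.pySetD days (k : Int)
                   ((PySem.List.pyGetD days (k : Int) ([], [])).1,
                    PySem.Set.discard (PySem.List.pyGetD days (k : Int) ([], [])).2 event)))
               (cp, queue)).1,
             ((PySem.List.pyGetD days (k : Int) ([], [])).1.foldl
               (stepAinner ctd assigned current event
                 (PySem.List.pySetD days (k : Int)
                   ((PySem.List.pyGetD days (k : Int) ([], [])).1,
                    PySem.Set.discard (PySem.List.pyGetD days (k : Int) ([], [])).2 event)))
               (cp, queue)).2) := by
        simp only [stepAmid, hcond, if_true]
      have hstepB : stepBmid assigned current event dcs (days.map (·.2), cp, queue) (k : Int)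
          = (PySem.List.pySetD (days.map (·.2)) (k : Int)
               (PySem.Set.discard (PySem.List.pyGetD (days.map (·.2)) (k : Int) []) event),
             ((PySem.List.pyGetD dcs (k : Int) []).foldl
               (stepBinner assigned current event) (cp, queue)).1,
             ((PySem.List.pyGetD dcs (k : Int) []).foldl
               (stepBinner assigned current event) (cp, queue)).2) := by
        simp only [stepBmid, ← hsnd, hcond, if_true]
      set days' := PySem.List.pySetD days (k : Int)
          ((PySem.List.pyGetD days (k : Int) ([], [])).1,
           PySem.Set.discard (PySem.List.pyGetD days (k : Int) ([], [])).2 event) with hdays'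
      clear_value days'
      have F1 : days'.map (·.2) = PySem.List.pySetD (days.map (·.2)) (k : Int)
          (PySem.Set.discard (PySem.List.pyGetD (days.map (·.2)) (k : Int) []) event) := by
        rw [hdays', PySem.List.pySetD_natCast, PySem.List.pySetD_natCast, List.map_set, hsnd]
      have F2 : days'.map (·.1) = dcs := by
        rw [hdays', PySem.List.pySetD_natCast, List.map_set, hmap, hfst]
        have hk' : k < dcs.length := hklen
        rw [List.getD_eq_getElem?_getD, List.getElem?_eq_getElem hk', Option.getD_some,
          List.set_getElem_self]
      have FACT : ∀ c, interAll (days'.map (·.2)) (ctd.getD c [])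
          = if (k : Int) ∈ ctd.getD c []
            then PySem.Set.discard (interAll (days.map (·.2)) (ctd.getD c [])) event
            else interAll (days.map (·.2)) (ctd.getD c []) := by
        intro c
        rw [F1]
        apply interAll_discard (days.map (·.2)) k (by rw [List.length_map, hdayslen]; exact hklen)
          event (ctd.getD c [])
          (fun i hi => by
            obtain ⟨m, hm, hmlen, _⟩ := HP c i hi
            exact ⟨m, hm, by rw [List.length_map, hdayslen]; exact hmlen⟩)
      have FACT1 : ∀ c, (k : Int) ∈ ctd.getD c [] →
          interAll (days'.map (·.2)) (ctd.getD c [])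
            = PySem.Set.discard (interAll (days.map (·.2)) (ctd.getD c [])) event :=
        fun c hc => (FACT c).trans (if_pos hc)
      have FACT2 : ∀ c, ¬ ((k : Int) ∈ ctd.getD c []) →
          interAll (days'.map (·.2)) (ctd.getD c [])
            = interAll (days.map (·.2)) (ctd.getD c []) :=
        fun c hc => (FACT c).trans (if_neg hc)
      have hcodes : ∀ oc ∈ (PySem.List.pyGetD days (k : Int) ([], [])).1,
          (k : Int) ∈ ctd.getD oc [] := by
        intro oc hoc
        rw [hfst] at hoc
        exact HQ k oc hklen hoc
      have hmix : ∀ c, assigned.contains c = false →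
          cp.getD c [] = interAll (days.map (·.2)) (ctd.getD c [])
          ∨ cp.getD c [] = interAll (days'.map (·.2)) (ctd.getD c []) :=
        fun c hc => Or.inl (hinv c hc)
      obtain ⟨e1, e2, e3, e4⟩ := inner_eq ctd assigned current event days'
        (days.map (fun x : List String × List String => x.2)) k
        FACT1 hcur (PySem.List.pyGetD days (k : Int) ([], [])).1 hcodes cp queue hmix
      have hinv' : ∀ c, assigned.contains c = false →
          ((PySem.List.pyGetD days (k : Int) ([], [])).1.foldl
            (stepAinner ctd assigned current event days') (cp, queue)).1.getD c []
          = interAll (days'.map (·.2)) (ctd.getD c []) := by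
        intro c hc
        by_cases hkc : (k : Int) ∈ ctd.getD c []
        · obtain ⟨k2, hk2, _, hcmem⟩ := HP c (k : Int) hkc
          have hk2k : k2 = k := by exact_mod_cast hk2.symm
          subst hk2k
          refine e4 c ?_ hc
          rw [hfst]
          exact hcmem
        · rcases e2 c hc with h | h
          · rw [h, FACT2 c hkc]
          · exact h
      have hcodesB : PySem.List.pyGetD dcs (k : Int) []
          = (PySem.List.pyGetD days (k : Int) ([], [])).1 := by
        rw [hfst, PySem.List.pyGetD_natCast]
      rw [hstepA, hstepB, hcodesB, ← e1, ← F1]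
      exact ih days' _ _ hidxs' F2 hinv'
    · -- event not in this day: both sides leave the state unchanged
      have hcond' : PySem.Set.contains (PySem.List.pyGetD days (k : Int) ([], [])).2 event = false := by
        cases h : PySem.Set.contains (PySem.List.pyGetD days (k : Int) ([], [])).2 event
        · rfl
        · exact absurd h hcond
      have hstepA : stepAmid ctd assigned current event (days, cp, queue) (k : Int)
          = (days, cp, queue) := by
        simp only [stepAmid, hcond', Bool.false_eq_true, if_false]
      have hstepB : stepBmid assigned current event dcs (days.map (·.2), cp, queue) (k : Int)
          = (days.map (·.2), cp, queue) := by
        simp only [stepBmid, ← hsnd, hcond', Bool.false_eq_true, if_false]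
      rw [hstepA, hstepB]
      exact ih days cp queue hidxs' hmap hinv

theorem dsA_loop_skip1 (ctd fuel days cp asg current queue)
    (hc : PySem.Dict.contains asg current = true) :
    dsA_loop ctd (fuel+1) days cp asg (current :: queue)
      = dsA_loop ctd fuel days cp asg queue := by
  simp only [dsA_loop, hc, if_true]

theorem dsA_loop_skip2 (ctd fuel days cp asg current queue)
    (hc : PySem.Dict.contains asg current = false)
    (hl : (PySem.Set.len (PySem.Dict.getD cp current []) != 1) = true) :
    dsA_loop ctd (fuel+1) days cp asg (current :: queue)
      = dsA_loop ctd fuel days cp asg queue := by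
  simp only [dsA_loop, hc, hl, Bool.false_eq_true, if_false, if_true]

theorem dsA_loop_step (ctd fuel days cp asg current queue)
    (hc : PySem.Dict.contains asg current = false)
    (hl : (PySem.Set.len (PySem.Dict.getD cp current []) != 1) = false) :
    dsA_loop ctd (fuel+1) days cp asg (current :: queue)
      = dsA_loop ctd fuel
          ((ctd.getD current []).foldl
            (stepAmid ctd (asg.insert current ((cp.getD current []).headD ""))
              current ((cp.getD current []).headD "")) (days, cp, queue)).1
          ((ctd.getD current []).foldl
            (stepAmid ctd (asg.insert current ((cp.getD current []).headD ""))
              current ((cp.getD current []).headD "")) (days, cp, queue)).2.1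
          (asg.insert current ((cp.getD current []).headD ""))
          ((ctd.getD current []).foldl
            (stepAmid ctd (asg.insert current ((cp.getD current []).headD ""))
              current ((cp.getD current []).headD "")) (days, cp, queue)).2.2 := by
  simp only [dsA_loop, hc, hl, Bool.false_eq_true, if_false]
  rfl

theorem dsB_loop_skip (cd fuel dcs de possible asg c queue)
    (h : (PySem.Dict.contains asg c || PySem.Set.len (PySem.Dict.getD possible c []) != 1) = true) :
    dsB_loop cd (fuel+1) dcs de possible asg (c :: queue)
      = dsB_loop cd fuel dcs de possible asg queue := by
  simp only [dsB_loop, h, if_true]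

theorem dsB_loop_step (cd fuel dcs de possible asg c queue)
    (h : (PySem.Dict.contains asg c || PySem.Set.len (PySem.Dict.getD possible c []) != 1) = false) :
    dsB_loop cd (fuel+1) dcs de possible asg (c :: queue)
      = dsB_loop cd fuel dcs
          ((cd.getD c []).foldl
            (stepBmid (asg.insert c ((possible.getD c []).headD ""))
              c ((possible.getD c []).headD "") dcs) (de, possible, queue)).1
          ((cd.getD c []).foldl
            (stepBmid (asg.insert c ((possible.getD c []).headD ""))
              c ((possible.getD c []).headD "") dcs) (de, possible, queue)).2.1
          (asg.insert c ((possible.getD c []).headD ""))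
          ((cd.getD c []).foldl
            (stepBmid (asg.insert c ((possible.getD c []).headD ""))
              c ((possible.getD c []).headD "") dcs) (de, possible, queue)).2.2 := by
  simp only [dsB_loop, h, Bool.false_eq_true, if_false]
  rfl

theorem loop_eq (ctd : PySem.Dict String (List Int)) (dcs : List (List String))
    (HP : ∀ c i, i ∈ ctd.getD c [] →
        ∃ k : Nat, i = (k : Int) ∧ k < dcs.length ∧ c ∈ dcs.getD k [])
    (HQ : ∀ (k : Nat) c, k < dcs.length → c ∈ dcs.getD k [] → (k : Int) ∈ ctd.getD c []) :
    ∀ (fuel : Nat) (days : List (List String × List String))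
      (cp : PySem.Dict String (List String)) (asg : PySem.Dict String String)
      (queue : List String),
    days.map (·.1) = dcs →
    (∀ c, asg.contains c = false →
        cp.getD c [] = interAll (days.map (·.2)) (ctd.getD c [])) →
    dsA_loop ctd fuel days cp asg queue
      = dsB_loop ctd fuel dcs (days.map (·.2)) cp asg queue := by
  intro fuel
  induction fuel with
  | zero => intro days cp asg queue _ _; rfl
  | succ fuel ih =>
    intro days cp asg queue hmap hinv
    cases queue with
    | nil => rfl
    | cons current queue =>
      by_cases hc : PySem.Dict.contains asg current = true
      · rw [dsA_loop_skip1 _ _ _ _ _ _ _ hc,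
          dsB_loop_skip _ _ _ _ _ _ _ _ (by rw [hc, Bool.true_or])]
        exact ih days cp asg queue hmap hinv
      · have hc' : PySem.Dict.contains asg current = false := by
          cases h : PySem.Dict.contains asg current
          · rfl
          · exact absurd h hc
        by_cases hl : (PySem.Set.len (PySem.Dict.getD cp current []) != 1) = true
        · rw [dsA_loop_skip2 _ _ _ _ _ _ _ hc' hl,
            dsB_loop_skip _ _ _ _ _ _ _ _ (by rw [hc', hl, Bool.false_or])]
          exact ih days cp asg queue hmap hinv
        · have hl' : (PySem.Set.len (PySem.Dict.getD cp current []) != 1) = false := by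
            cases h : (PySem.Set.len (PySem.Dict.getD cp current []) != 1)
            · rfl
            · exact absurd h hl
          rw [dsA_loop_step _ _ _ _ _ _ _ hc' hl',
            dsB_loop_step _ _ _ _ _ _ _ _ (by rw [hc', hl', Bool.false_or])]
          have hcur : (asg.insert current ((cp.getD current []).headD "")).contains current
              = true := PySem.Dict.contains_insert_self ..
          have hinv' : ∀ c,
              (asg.insert current ((cp.getD current []).headD "")).contains c = false →
              cp.getD c [] = interAll (days.map (·.2)) (ctd.getD c []) := by
            intro c hcf
            apply hinv
            cases h : PySem.Dict.contains asg c
            · rfl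
            · exfalso
              have hci : (asg.insert current ((cp.getD current []).headD "")).contains c
                  = (c == current || asg.contains c) := PySem.Dict.contains_insert ..
              rw [hcf, h, Bool.or_true] at hci
              exact Bool.false_ne_true hci
          obtain ⟨m1, m2, m3⟩ := middle_eq ctd
            (asg.insert current ((cp.getD current []).headD "")) current
            ((cp.getD current []).headD "") dcs HP HQ hcur
            (ctd.getD current []) days cp queue (fun i hi => hi) hmap hinv'
          rw [m1]
          exact ih _ _ _ _ m2 m3

-- getD through map of fst/snd with matching defaults
theorem getD_map_fst (days_input : List (List String × List String)) (k : Nat) :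
    (days_input.map (fun p => p.1)).getD k [] = (days_input.getD k ([], [])).1 := by
  rw [List.getD_eq_getElem?_getD, List.getD_eq_getElem?_getD, List.getElem?_map]
  cases days_input[k]? <;> rfl

-- A's build fold, split into its two components (and A's if-idiom replaced by setdefault)
theorem buildA_eq (l : List (Int × (List String × List String)))
    (a : List (List String × List String)) (m : PySem.Dict String (List Int)) :
    l.foldl (fun (st : List (List String × List String) × PySem.Dict String (List Int)) ie =>
        (st.1 ++ [(ie.2.1, PySem.Set.ofList ie.2.2)],
         ie.2.1.foldl (fun m code =>
            (if m.contains code then m else m.insert code ([] : List Int)).insert code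
              ((if m.contains code then m else m.insert code ([] : List Int)).getD code []
                ++ [ie.1])) st.2)) (a, m)
      = (a ++ l.map (fun ie => (ie.2.1, PySem.Set.ofList ie.2.2)),
         l.foldl (fun m ie => ie.2.1.foldl (fun m cd =>
            let m' := m.setdefault cd ([] : List Int)
            m'.insert cd (m'.getD cd [] ++ [ie.1])) m) m) := by
  induction l generalizing a m with
  | nil => simp
  | cons ie rest ih =>
    rw [List.foldl_cons, List.foldl_cons, ih]
    have hinner : ie.2.1.foldl (fun m code =>
          (if m.contains code then m else m.insert code ([] : List Int)).insert code
            ((if m.contains code then m else m.insert code ([] : List Int)).getD code []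
              ++ [ie.1])) m
        = ie.2.1.foldl (fun m cd =>
            let m' := m.setdefault cd ([] : List Int)
            m'.insert cd (m'.getD cd [] ++ [ie.1])) m :=
      PySem.List.foldl_congr_mem _ _ _ _
        (fun acc x _ => congrFun (congrFun (congrFun ctd_step_eq acc) x) ie.1)
    rw [hinner]
    simp

-- B's build fold, split into its three components
theorem buildB_eq (l : List (Int × (List String × List String)))
    (a b : List (List String)) (m : PySem.Dict String (List Int)) :
    l.foldl (fun (st : List (List String) × List (List String) × PySem.Dict String (List Int)) ie =>
        (st.1 ++ [ie.2.1], st.2.1 ++ [PySem.Set.ofList ie.2.2],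
         ie.2.1.foldl (fun m c =>
            (m.setdefault c ([] : List Int)).insert c
              ((m.setdefault c ([] : List Int)).getD c [] ++ [ie.1])) st.2.2)) (a, b, m)
      = (a ++ l.map (fun ie => ie.2.1), b ++ l.map (fun ie => PySem.Set.ofList ie.2.2),
         l.foldl (fun m ie => ie.2.1.foldl (fun m cd =>
            let m' := m.setdefault cd ([] : List Int)
            m'.insert cd (m'.getD cd [] ++ [ie.1])) m) m) := by
  induction l generalizing a b m with
  | nil => simp
  | cons ie rest ih =>
    rw [List.foldl_cons, List.foldl_cons, ih]
    simp

-- membership in the built codes_to_days dict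
theorem ctd_mem_iff (days_input : List (List String × List String)) (c : String) (i : Int) :
    i ∈ ((PySem.List.enumerate days_input 0).foldl
        (fun m ie => ie.2.1.foldl (fun m cd =>
            let m' := m.setdefault cd ([] : List Int)
            m'.insert cd (m'.getD cd [] ++ [ie.1])) m) PySem.Dict.empty).getD c []
      ↔ ∃ k : Nat, k < days_input.length ∧ i = (k : Int)
          ∧ c ∈ (days_input.getD k ([], [])).1 := by
  rw [ctd_build_getD, PySem.Dict.getD_empty, List.nil_append]
  rw [List.mem_flatMap]
  constructor
  · rintro ⟨ie, hie, hrep⟩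
    obtain ⟨hcnt, hi⟩ := List.mem_replicate.mp hrep
    obtain ⟨k, hk, rfl⟩ := (PySem.List.mem_enumerate_iff days_input 0 ie).mp hie
    refine ⟨k, hk, by simpa using hi, ?_⟩
    have : c ∈ days_input[k].1 := by
      by_contra hmem
      exact hcnt (List.count_eq_zero.mpr hmem)
    rwa [List.getD_eq_getElem?_getD, List.getElem?_eq_getElem hk, Option.getD_some]
  · rintro ⟨k, hk, rfl, hmem⟩
    refine ⟨((0 : Int) + (k : Int), days_input[k]), ?_, ?_⟩
    · exact (PySem.List.mem_enumerate_iff days_input 0 _).mpr ⟨k, hk, rfl⟩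
    · rw [List.getD_eq_getElem?_getD, List.getElem?_eq_getElem hk, Option.getD_some] at hmem
      refine List.mem_replicate.mpr ⟨fun h0 => List.count_eq_zero.mp h0 hmem, by simp⟩

-- keys of the built dict are unique
theorem ctd_keys_nodup (days_input : List (List String × List String)) :
    ((PySem.List.enumerate days_input 0).foldl
        (fun m ie => ie.2.1.foldl (fun m cd =>
            let m' := m.setdefault cd ([] : List Int)
            m'.insert cd (m'.getD cd [] ++ [ie.1])) m) PySem.Dict.empty).keys.Nodup :=
  ctd_build_nodup _ _ PySem.Dict.nodup_keys_empty

-- A's Option-valued intersection fold (no break) computes interAll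
theorem optfold_some (days : List (List String × List String)) (idxs : List Int) :
    ∀ p : List String,
    idxs.foldl (fun (poss : Option (List String)) day_idx =>
        match poss with
        | none => some (PySem.List.pyGetD days day_idx ([], [])).2
        | some q => some (PySem.Set.inter q (PySem.List.pyGetD days day_idx ([], [])).2))
      (some p)
      = some (idxs.foldl (fun s dd =>
          PySem.Set.inter s (PySem.List.pyGetD (days.map (fun x : List String × List String => x.2)) dd [])) p) := by
  induction idxs with
  | nil => intro p; rfl
  | cons d rest ih =>
    intro p
    rw [List.foldl_cons, List.foldl_cons]
    show rest.foldl _ (some (PySem.Set.inter p (PySem.List.pyGetD days d ([], [])).2)) = _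
    rw [ih, pv_pyGetD_snd]

theorem optfold_val (days : List (List String × List String)) (idxs : List Int) :
    ((idxs.foldl (fun (poss : Option (List String)) day_idx =>
        match poss with
        | none => some (PySem.List.pyGetD days day_idx ([], [])).2
        | some q => some (PySem.Set.inter q (PySem.List.pyGetD days day_idx ([], [])).2))
      none).getD [])
      = interAll (days.map (fun x : List String × List String => x.2)) idxs := by
  cases idxs with
  | nil => rfl
  | cons d rest =>
    rw [List.foldl_cons]
    show ((rest.foldl _ (some (PySem.List.pyGetD days d ([], [])).2)).getD []) = _
    rw [optfold_some, Option.getD_some, interAll, pv_pyGetD_snd]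

theorem getD_fold_insert (keys : List String) (v : String → List String) :
    ∀ (acc : PySem.Dict String (List String)) (c : String),
    (keys.foldl (fun d code => d.insert code (v code)) acc).getD c []
      = if c ∈ keys then v c else acc.getD c [] := by
  induction keys with
  | nil => intro acc c; simp
  | cons x rest ih =>
    intro acc c
    rw [List.foldl_cons, ih]
    by_cases hcr : c ∈ rest
    · rw [if_pos hcr, if_pos (List.mem_cons_of_mem _ hcr)]
    · rw [if_neg hcr]
      by_cases hcx : c = x
      · subst hcx
        rw [PySem.Dict.getD_insert_self, if_pos (List.mem_cons_self ..)]
      · rw [PySem.Dict.getD_insert_of_ne _ _ _ hcx,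
          if_neg (fun h => (List.mem_cons.mp h).elim hcx hcr)]

-- the two initial candidate dicts coincide
theorem cp_eq (ctd : PySem.Dict String (List Int)) (days : List (List String × List String))
    (hnd : ctd.keys.Nodup) (de : List (List String))
    (hde : de = days.map (fun x : List String × List String => x.2)) :
    ctd.items.foldl (fun (p : PySem.Dict String (List String)) it =>
        p.insert it.1
          (match it.2 with
           | [] => []
           | d0 :: rest =>
             rest.foldl (fun s d => PySem.Set.inter s (PySem.List.pyGetD de d []))
               (PySem.List.pyGetD de d0 [])))
      PySem.Dict.empty
      = ctd.keys.foldl (fun (cp : PySem.Dict String (List String)) code =>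
          cp.insert code
            (((ctd.getD code []).foldl (fun (poss : Option (List String)) day_idx =>
                match poss with
                | none => some (PySem.List.pyGetD days day_idx ([], [])).2
                | some q => some (PySem.Set.inter q (PySem.List.pyGetD days day_idx ([], [])).2))
              none).getD []))
        PySem.Dict.empty := by
  rw [PySem.Dict.items_eq_map_keys ctd hnd ([] : List Int), List.foldl_map]
  apply PySem.List.foldl_congr_mem
  intro acc x _
  have hval : (match ctd.getD x [] with
        | [] => ([] : List String)
        | d0 :: rest =>
          rest.foldl (fun s d => PySem.Set.inter s (PySem.List.pyGetD de d []))
            (PySem.List.pyGetD de d0 []))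
      = interAll de (ctd.getD x []) := by
    cases ctd.getD x [] <;> rfl
  rw [hval, hde, optfold_val]

-- initial queue: A's append-fold is B's filter-map
theorem queue_eq (cp : PySem.Dict String (List String)) :
    cp.items.foldl (fun q it => if PySem.Set.len it.2 == 1 then q ++ [it.1] else q)
      ([] : List String)
      = (cp.items.filter (fun it => PySem.Set.len it.2 == 1)).map (fun it => it.1) := by
  rw [PySem.List.foldl_append_if (fun it => PySem.Set.len it.2 == 1) (fun it => it.1)
    cp.items [], List.nil_append]

-- the candidate dict built by A satisfies the intersection invariant
theorem cpA_getD (ctd : PySem.Dict String (List Int)) (days : List (List String × List String))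
    (hnd : ctd.keys.Nodup) (c : String) :
    (ctd.keys.foldl (fun (cp : PySem.Dict String (List String)) code =>
        cp.insert code
          (((ctd.getD code []).foldl (fun (poss : Option (List String)) day_idx =>
              match poss with
              | none => some (PySem.List.pyGetD days day_idx ([], [])).2
              | some q => some (PySem.Set.inter q (PySem.List.pyGetD days day_idx ([], [])).2))
            none).getD []))
      PySem.Dict.empty).getD c []
      = interAll (days.map (fun x : List String × List String => x.2)) (ctd.getD c []) := by
  rw [getD_fold_insert]
  by_cases hck : c ∈ ctd.keys
  · rw [if_pos hck, optfold_val]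
  · rw [if_neg hck, PySem.Dict.getD_empty]
    have hc : ctd.contains c = false := by
      cases h : ctd.contains c
      · rfl
      · exact absurd ((PySem.Dict.contains_iff_mem_keys ctd c).mp h) hck
    rw [PySem.Dict.getD_of_not_contains _ _ hc]
    rfl

theorem decode_eq (days_input : List (List String × List String)) :
    decode_signals days_input = decode_signals_alt days_input := by
  simp only [decode_signals, decode_signals_alt]
  rw [buildA_eq, buildB_eq]
  simp only [List.nil_append]
  have hdcsInput : List.map (fun ie => ie.2.1) (PySem.List.enumerate days_input 0)
      = days_input.map (fun p => p.1) := by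
    conv_rhs => rw [← PySem.List.map_snd_enumerate days_input 0, List.map_map]
    rfl
  have hnd := ctd_keys_nodup days_input
  have hdcs : (List.map (fun ie => (ie.2.1, PySem.Set.ofList ie.2.2))
        (PySem.List.enumerate days_input 0)).map (fun x : List String × List String => x.1)
      = List.map (fun ie => ie.2.1) (PySem.List.enumerate days_input 0) := by
    rw [List.map_map]; rfl
  have hde : List.map (fun ie => PySem.Set.ofList ie.2.2) (PySem.List.enumerate days_input 0)
      = (List.map (fun ie => (ie.2.1, PySem.Set.ofList ie.2.2))
          (PySem.List.enumerate days_input 0)).map (fun x : List String × List String => x.2) := by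
    rw [List.map_map]; rfl
  rw [hde]
  rw [cp_eq _ (List.map (fun ie => (ie.2.1, PySem.Set.ofList ie.2.2))
      (PySem.List.enumerate days_input 0)) hnd _ rfl]
  rw [queue_eq]
  apply loop_eq
  · intro c i hi
    obtain ⟨k, hk, rfl, hmem⟩ := (ctd_mem_iff days_input c i).mp hi
    refine ⟨k, rfl, ?_, ?_⟩
    · rw [hdcsInput, List.length_map]; exact hk
    · rw [hdcsInput, getD_map_fst]; exact hmem
  · intro k c hklen hcmem
    apply (ctd_mem_iff days_input c (k : Int)).mpr
    refine ⟨k, ?_, rfl, ?_⟩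
    · rw [hdcsInput, List.length_map] at hklen; exact hklen
    · rw [hdcsInput, getD_map_fst] at hcmem; exact hcmem
  · exact hdcs
  · intro c _
    exact cpA_getD _ _ hnd c


-- ===== VERDICT (by name: the statement is the Claim_ definition above) =====
theorem decode_signals_spec : Claim_equal_decode_signals := by
  intro days_input _
  exact decode_eq days_input
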